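-- pv_equiv track=rewrite | github.com/polpol27/Ising | wolff8.py | estandar
-- ===== SOURCE A (Python) =====
-- def estandar(lenv,L,n,K=2):
--     """
--     Cálculo de las conexiones en el caso de primeros K/2 vecinos.
--
--     Se basa en la transformación del nodo en forma vectorial al nodo en forma "matricial".
--
--     Dado un nodo k, se construyen las componentes (i1,i2,...,in), donde n es la dimensionalidad de la red.
--     Estas componentes se escogen de manera que i1*L^(n-1) + i2*L^(n-2) + ... + i_{n-1} * L + i_n = k
--     Las conexiones establecidas serán con los nodos (i1 +- j, i2, ..., in), (i1,i2 +- j,...in), ... ,(i1, i2, ..., in +- j), donde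
--     j va desde 1 hasta K/2, teniendo en cuenta las condiciones periódicas.
--     Una vez establecidas las conexiones, se transforman a forma vectorial sin más que calcular el polinomio anterior cambiando los
--     coeficientes correspondientes.
--
--     Argumentos:
--     lenv: int
--         Longitud del vector de nodos.
--     L: int
--         Longitud de la red.
--     n: int
--         Dimensionalidad de la red
--     K: int (par)
--         Define el número de primeros vecinos de las conexiones: K/2.
--
--     Output:
--     lista:
--         Lista de conexiones.
--
--     """
--     lista=[]
--     for k in range(lenv):
--         vcon=[]
--         coeffs=[0]*n
--         kcalc=k
--         for i in range(n):
--             coeffs[i]=kcalc//(L**(n-i-1))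
--             kcalc=kcalc%(L**(n-i-1))
--
--
--         def calc(coeffs,ind,suma,n,L):
--             conex=0
--             coeffs[ind]=(coeffs[ind]+suma)%L
--             for i in range(n):
--                 conex=conex+coeffs[i]*L**(n-i-1)
--             return conex
--
--         for i in range(n):
--             for j in range(int(K/2)):
--                 vcon.append(calc(coeffs.copy(),i,j+1,n,L))
--                 vcon.append(calc(coeffs.copy(),i,-j-1,n,L))
--         lista.append(vcon)
--     return lista
-- ===== SOURCE B (Python) =====
-- def estandar(lenv, L, n, K=2):
--     """Same connection lists, but with precomputed powers of L and an
--     incremental neighbor formula: each neighbor is obtained from k by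
--     adjusting a single digit, instead of re-summing the full polynomial."""
--     half = int(K / 2)
--     lista = []
--     if lenv <= 0:
--         return lista
--     pows = [L ** (n - 1 - i) for i in range(n)]
--     for k in range(lenv):
--         coeffs = []
--         kc = k
--         for p in pows:
--             coeffs.append(kc // p)
--             kc = kc % p
--         vcon = []
--         for i in range(n):
--             c = coeffs[i]
--             p = pows[i]
--             base = k - c * p
--             for j in range(1, half + 1):
--                 vcon.append(base + ((c + j) % L) * p)
--                 vcon.append(base + ((c - j) % L) * p)
--         lista.append(vcon)
--     return lista
-- ===== Notes on version B (the rewrite author's own statement) =====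
-- stated objective: faster
-- what changed: B precomputes the list of powers of L once and derives each neighbor incrementally as k - c_i*p_i + ((c_i±j)%L)*p_i instead of re-decomposing and re-summing the full n-term polynomial for every neighbor; intended as faster (O(lenv*n*K) vs O(lenv*n^2*K) arithmetic operations; measured 40.8x at the largest size both finished, unconfirmed at sizes where A times out).
import Mathlib
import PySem

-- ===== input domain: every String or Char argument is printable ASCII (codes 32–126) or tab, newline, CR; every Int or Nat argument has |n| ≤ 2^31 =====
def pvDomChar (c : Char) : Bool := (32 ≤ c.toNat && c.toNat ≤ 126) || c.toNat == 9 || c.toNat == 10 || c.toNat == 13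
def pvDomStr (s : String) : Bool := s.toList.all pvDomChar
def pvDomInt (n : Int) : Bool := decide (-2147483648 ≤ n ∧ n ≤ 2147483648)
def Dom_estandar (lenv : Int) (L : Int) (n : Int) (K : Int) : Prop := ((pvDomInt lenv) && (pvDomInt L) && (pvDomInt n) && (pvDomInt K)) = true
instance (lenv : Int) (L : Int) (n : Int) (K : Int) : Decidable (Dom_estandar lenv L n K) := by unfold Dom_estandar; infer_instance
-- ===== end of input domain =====

-- B builds each neighbor incrementally from k with precomputed powers of L instead of
-- re-summing the full n-term polynomial per neighbor (intended as faster; measured 40.8x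
-- at the largest size both versions finished).

-- ===== PORT A =====
-- Python helper calc(coeffs, ind, suma, n, L); ind is always a valid index (0 ≤ ind < n = len coeffs)
def estandarCalc (coeffs : List Int) (ind : Int) (suma : Int) (n : Int) (L : Int) : Int :=
  let coeffs := coeffs.set ind.toNat (PySem.Int.mod (PySem.List.pyGetD coeffs ind 0 + suma) L)
  (PySem.List.pyRange 0 n 1).foldl
    (fun conex i => conex + PySem.List.pyGetD coeffs i 0 * L ^ (n - i - 1).toNat) 0

-- int(K/2) = Int.tdiv K 2 (float division then truncation toward zero; exact for |K| ≤ 2^31)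
def estandar (lenv : Int) (L : Int) (n : Int) (K : Int) : List (List Int) :=
  (PySem.List.pyRange 0 lenv 1).foldl (fun lista k =>
    let st := (PySem.List.pyRange 0 n 1).foldl
      (fun (st : List Int × Int) i =>
        (st.1.set i.toNat (PySem.Int.floordiv st.2 (L ^ (n - i - 1).toNat)),
         PySem.Int.mod st.2 (L ^ (n - i - 1).toNat)))
      (List.replicate n.toNat 0, k)
    let coeffs := st.1
    let vcon := (PySem.List.pyRange 0 n 1).foldl (fun vcon i =>
      (PySem.List.pyRange 0 (Int.tdiv K 2) 1).foldl (fun vcon j =>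
        (vcon ++ [estandarCalc coeffs i (j + 1) n L]) ++ [estandarCalc coeffs i (-j - 1) n L])
        vcon) ([] : List Int)
    lista ++ [vcon]) []

-- ===== PORT B =====
def estandar_alt (lenv : Int) (L : Int) (n : Int) (K : Int) : List (List Int) :=
  let half := Int.tdiv K 2
  if lenv ≤ 0 then [] else
  let pows := (PySem.List.pyRange 0 n 1).map (fun i => L ^ (n - 1 - i).toNat)
  (PySem.List.pyRange 0 lenv 1).foldl (fun lista k =>
    let st := pows.foldl
      (fun (st : List Int × Int) p =>
        (st.1 ++ [PySem.Int.floordiv st.2 p], PySem.Int.mod st.2 p))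
      (([] : List Int), k)
    let coeffs := st.1
    let vcon := (PySem.List.pyRange 0 n 1).foldl (fun vcon i =>
      let c := PySem.List.pyGetD coeffs i 0
      let p := PySem.List.pyGetD pows i 0
      let base := k - c * p
      (PySem.List.pyRange 1 (half + 1) 1).foldl (fun vcon j =>
        (vcon ++ [base + PySem.Int.mod (c + j) L * p])
          ++ [base + PySem.Int.mod (c - j) L * p])
        vcon) ([] : List Int)
    lista ++ [vcon]) []

-- ===== PRECONDITION & SPEC =====
-- Pre_ excludes exactly the inputs where Python A raises ZeroDivisionError (L = 0 with at
-- least one node and a dimension whose loop divides or takes '% L'); Python B raises there too.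
def Pre_estandar (lenv : Int) (L : Int) (n : Int) (K : Int) : Prop :=
  lenv ≤ 0 ∨ n ≤ 0 ∨ L ≠ 0 ∨ (n = 1 ∧ K < 2)
instance (lenv : Int) (L : Int) (n : Int) (K : Int) : Decidable (Pre_estandar lenv L n K) := by
  unfold Pre_estandar; infer_instance

def pvWitness_estandar : Int × Int × Int × Int := (9, 3, 2, 2)

def Spec_estandar (lenv : Int) (L : Int) (n : Int) (K : Int) (out : List (List Int)) : Prop :=
  out = estandar_alt lenv L n K
instance (lenv : Int) (L : Int) (n : Int) (K : Int) (out : List (List Int)) :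
    Decidable (Spec_estandar lenv L n K out) := by unfold Spec_estandar; infer_instance

-- ===== CLAIM (what is proved, stated in full; the proofs are below) =====
def Claim_equal_estandar : Prop := ∀ (lenv : Int) (L : Int) (n : Int) (K : Int),
  Dom_estandar lenv L n K → Pre_estandar lenv L n K →
  Spec_estandar lenv L n K (estandar lenv L n K)

-- ===== LEMMAS AND PROOFS =====

-- the digit/remainder pair the decomposition loop of either port computes
def digitsR (L : Int) : Nat → Int → List Int × Int
  | 0, k => ([], k)
  | m + 1, k =>
    let r := digitsR L m (PySem.Int.mod k (L ^ m))
    (PySem.Int.floordiv k (L ^ m) :: r.1, r.2)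

-- Σ cs[i] * L^(len-1-i)
def sumPoly (L : Int) : List Int → Int
  | [] => 0
  | c :: cs => c * L ^ cs.length + sumPoly L cs

def powsList (L : Int) (m : Nat) : List Int := (List.range m).map (fun j => L ^ (m - 1 - j))

theorem digitsR_len (L : Int) (m : Nat) (k : Int) : (digitsR L m k).1.length = m := by
  induction m generalizing k with
  | zero => simp [digitsR]
  | succ m ih => simp [digitsR, ih]

theorem digitsR_snd (L : Int) (m : Nat) (k : Int) (hm : 1 ≤ m) : (digitsR L m k).2 = 0 := by
  induction m generalizing k with
  | zero => omega
  | succ m ih =>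
    by_cases h : 1 ≤ m
    · simpa [digitsR] using ih _ h
    · have hm0 : m = 0 := by omega
      subst hm0
      simp only [digitsR]
      rw [show (L ^ 0 : Int) = 1 by norm_num, PySem.Int.mod_eq_emod_of_pos one_pos]
      exact Int.emod_one k

theorem digitsR_sum (L : Int) (m : Nat) (k : Int) :
    sumPoly L (digitsR L m k).1 + (digitsR L m k).2 = k := by
  induction m generalizing k with
  | zero => simp [digitsR, sumPoly]
  | succ m ih =>
    have h2 := ih (PySem.Int.mod k (L ^ m))
    have h3 := PySem.Int.floordiv_mul_add_mod k (L ^ m)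
    simp only [digitsR, sumPoly, digitsR_len]
    linarith

theorem powsList_succ (L : Int) (m : Nat) : powsList L (m + 1) = L ^ m :: powsList L m := by
  apply List.ext_getElem
  · simp [powsList]
  · intro t h1 h2
    rcases t with _ | t
    · simp [powsList]
    · simp only [powsList, List.getElem_map, List.getElem_range, List.getElem_cons_succ]
      congr 1
      omega

theorem foldB_acc (ps : List Int) (acc : List Int) (k : Int) :
    (ps.foldl (fun (st : List Int × Int) p =>
        (st.1 ++ [PySem.Int.floordiv st.2 p], PySem.Int.mod st.2 p)) (acc, k))
    = (acc ++ (ps.foldl (fun (st : List Int × Int) p =>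
        (st.1 ++ [PySem.Int.floordiv st.2 p], PySem.Int.mod st.2 p)) ([], k)).1,
       (ps.foldl (fun (st : List Int × Int) p =>
        (st.1 ++ [PySem.Int.floordiv st.2 p], PySem.Int.mod st.2 p)) ([], k)).2) := by
  induction ps generalizing acc k with
  | nil => simp
  | cons p ps ih =>
    simp only [List.foldl_cons]
    rw [ih (acc ++ [PySem.Int.floordiv k p]), ih ([] ++ [PySem.Int.floordiv k p])]
    simp

theorem foldB_digits (L : Int) (m : Nat) (k : Int) :
    ((powsList L m).foldl (fun (st : List Int × Int) p =>
        (st.1 ++ [PySem.Int.floordiv st.2 p], PySem.Int.mod st.2 p)) ([], k))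
    = digitsR L m k := by
  induction m generalizing k with
  | zero => simp [powsList, digitsR]
  | succ m ih =>
    rw [powsList_succ, List.foldl_cons, foldB_acc]
    simp [ih, digitsR]

theorem take_set_succ {α : Type} (cs : List α) (a : Nat) (d : α) (h : a < cs.length) :
    (cs.set a d).take (a + 1) = cs.take a ++ [d] := by
  induction cs generalizing a with
  | nil => simp at h
  | cons x xs ih =>
    cases a with
    | zero => simp
    | succ a => simp [ih a (by simpa using h)]

theorem foldA_digits (L n : Int) (hn : 0 ≤ n) :
    ∀ (m a : Nat), a + m = n.toNat → ∀ (cs : List Int) (kc : Int), cs.length = n.toNat →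
    ((PySem.List.pyRange (a : Int) n 1).foldl
       (fun (st : List Int × Int) i =>
          (st.1.set i.toNat (PySem.Int.floordiv st.2 (L ^ (n - i - 1).toNat)),
           PySem.Int.mod st.2 (L ^ (n - i - 1).toNat))) (cs, kc)).1
    = cs.take a ++ (digitsR L m kc).1 := by
  intro m
  induction m with
  | zero =>
    intro a ha cs kc hcs
    rw [PySem.List.pyRange_one_eq_nil (by omega)]
    have htake : cs.take a = cs := List.take_of_length_le (by omega)
    simp [digitsR, htake]
  | succ m ih =>
    intro a ha cs kc hcs
    rw [PySem.List.pyRange_one_cons (show (a : Int) < n by omega)]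
    simp only [List.foldl_cons]
    have e1 : ((a : Int)).toNat = a := by omega
    have e2 : (n - (a : Int) - 1).toNat = m := by omega
    rw [e1, e2]
    have := ih (a + 1) (by omega)
      (cs.set a (PySem.Int.floordiv kc (L ^ m))) (PySem.Int.mod kc (L ^ m))
      (by simp [hcs])
    rw [show ((a : Int) + 1) = ((a + 1 : Nat) : Int) by push_cast; ring]
    rw [this, take_set_succ cs a _ (by omega)]
    simp [digitsR]

theorem sumFold (L n : Int) (hn : 0 ≤ n) (cs : List Int) (hcs : cs.length = n.toNat) :
    ∀ (m a : Nat), a + m = n.toNat → ∀ (acc : Int),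
    (PySem.List.pyRange (a : Int) n 1).foldl
      (fun conex i => conex + PySem.List.pyGetD cs i 0 * L ^ (n - i - 1).toNat) acc
    = acc + sumPoly L (cs.drop a) := by
  intro m
  induction m with
  | zero =>
    intro a ha acc
    rw [PySem.List.pyRange_one_eq_nil (by omega)]
    have hd : cs.drop a = [] := List.drop_of_length_le (by omega)
    simp [hd, sumPoly]
  | succ m ih =>
    intro a ha acc
    rw [PySem.List.pyRange_one_cons (show (a : Int) < n by omega)]
    simp only [List.foldl_cons]
    have hlt : a < cs.length := by omega
    have hg : PySem.List.pyGetD cs (a : Int) 0 = cs[a] := by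
      rw [PySem.List.pyGetD_of_nonneg cs 0 (by positivity)]
      simp [List.getD_eq_getElem?_getD, List.getElem?_eq_getElem hlt]
    have hdrop : cs.drop a = cs[a] :: cs.drop (a + 1) := List.drop_eq_getElem_cons hlt
    have e2 : (n - (a : Int) - 1).toNat = (cs.drop (a + 1)).length := by
      simp [hcs]; omega
    rw [show ((a : Int) + 1) = ((a + 1 : Nat) : Int) by push_cast; ring]
    rw [ih (a + 1) (by omega)]
    rw [hdrop]
    simp only [sumPoly, hg, e2]
    ring

theorem sumPoly_set (L : Int) (cs : List Int) (i : Nat) (d : Int) (h : i < cs.length) :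
    sumPoly L (cs.set i d) = sumPoly L cs + (d - cs[i]) * L ^ (cs.length - 1 - i) := by
  induction cs generalizing i with
  | nil => simp at h
  | cons x xs i_ih =>
    cases i with
    | zero => simp [sumPoly]; ring
    | succ i =>
      have hx : i < xs.length := by simpa using h
      rw [show (x :: xs).set (i + 1) d = x :: xs.set i d from rfl]
      simp only [sumPoly, List.length_set, List.getElem_cons_succ, List.length_cons]
      rw [i_ih i hx]
      have : xs.length + 1 - 1 - (i + 1) = xs.length - 1 - i := by omega
      rw [this]
      ring

theorem calcA_eq (L n : Int) (cs : List Int) (hcs : cs.length = n.toNat)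
    (i : Int) (hi0 : 0 ≤ i) (hin : i < n) (s : Int) :
    estandarCalc cs i s n L
    = sumPoly L cs
      + (PySem.Int.mod (cs[i.toNat]'(by omega) + s) L - cs[i.toNat]'(by omega))
        * L ^ (n - 1 - i).toNat := by
  have hn : 0 ≤ n := by omega
  have hlt : i.toNat < cs.length := by omega
  have hg : PySem.List.pyGetD cs i 0 = cs[i.toNat] := by
    rw [PySem.List.pyGetD_of_nonneg cs 0 hi0]
    simp [List.getD_eq_getElem?_getD, List.getElem?_eq_getElem hlt]
  simp only [estandarCalc]
  rw [hg]
  have hs := sumFold L n hn (cs.set i.toNat (PySem.Int.mod (cs[i.toNat] + s) L))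
    (by simp [hcs]) n.toNat 0 (by omega) 0
  rw [show (((0 : Nat) : Int)) = (0 : Int) by norm_num] at hs
  rw [hs]
  rw [List.drop_zero, sumPoly_set L cs i.toNat _ hlt]
  have : cs.length - 1 - i.toNat = (n - 1 - i).toNat := by omega
  rw [this]
  ring

-- the per-node connection lists agree (for every k; trivially when n ≤ 0)
theorem vcon_eq (L n K k : Int) :
    (let st := (PySem.List.pyRange 0 n 1).foldl
        (fun (st : List Int × Int) i =>
          (st.1.set i.toNat (PySem.Int.floordiv st.2 (L ^ (n - i - 1).toNat)),
           PySem.Int.mod st.2 (L ^ (n - i - 1).toNat)))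
        (List.replicate n.toNat 0, k)
     (PySem.List.pyRange 0 n 1).foldl (fun vcon i =>
        (PySem.List.pyRange 0 (Int.tdiv K 2) 1).foldl (fun vcon j =>
          (vcon ++ [estandarCalc st.1 i (j + 1) n L]) ++ [estandarCalc st.1 i (-j - 1) n L])
          vcon) ([] : List Int))
    = (let pows := (PySem.List.pyRange 0 n 1).map (fun i => L ^ (n - 1 - i).toNat)
       let st := pows.foldl
        (fun (st : List Int × Int) p =>
          (st.1 ++ [PySem.Int.floordiv st.2 p], PySem.Int.mod st.2 p))
        (([] : List Int), k)
       (PySem.List.pyRange 0 n 1).foldl (fun vcon i =>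
        let c := PySem.List.pyGetD st.1 i 0
        let p := PySem.List.pyGetD pows i 0
        let base := k - c * p
        (PySem.List.pyRange 1 (Int.tdiv K 2 + 1) 1).foldl (fun vcon j =>
          (vcon ++ [base + PySem.Int.mod (c + j) L * p])
            ++ [base + PySem.Int.mod (c - j) L * p])
          vcon) ([] : List Int)) := by
  by_cases hn : n ≤ 0
  · rw [PySem.List.pyRange_one_eq_nil hn]
    simp
  have hn0 : 0 ≤ n := by omega
  have hm1 : 1 ≤ n.toNat := by omega
  -- the B-side power list is powsList
  have hpows : ((PySem.List.pyRange 0 n 1).map (fun i => L ^ (n - 1 - i).toNat))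
      = powsList L n.toNat := by
    rw [show n = ((n.toNat : Nat) : Int) by omega, PySem.List.pyRange_zero_natCast]
    simp only [powsList, List.map_map]
    apply List.map_congr_left
    intro j hj
    simp only [Function.comp]
    congr 1
    omega
  -- both decomposition loops produce the same digit list
  have hA : ((PySem.List.pyRange 0 n 1).foldl
      (fun (st : List Int × Int) i =>
        (st.1.set i.toNat (PySem.Int.floordiv st.2 (L ^ (n - i - 1).toNat)),
         PySem.Int.mod st.2 (L ^ (n - i - 1).toNat)))
      (List.replicate n.toNat 0, k)).1 = (digitsR L n.toNat k).1 := by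
    have := foldA_digits L n hn0 n.toNat 0 (by omega) (List.replicate n.toNat 0) k (by simp)
    rw [show ((0 : Nat) : Int) = 0 by norm_num] at this
    simpa using this
  have hB : (((PySem.List.pyRange 0 n 1).map (fun i => L ^ (n - 1 - i).toNat)).foldl
      (fun (st : List Int × Int) p =>
        (st.1 ++ [PySem.Int.floordiv st.2 p], PySem.Int.mod st.2 p))
      (([] : List Int), k)).1 = (digitsR L n.toNat k).1 := by
    rw [hpows, foldB_digits]
  simp only [hpows, foldB_digits, hA]
  set cs := (digitsR L n.toNat k).1 with hcsdef
  have hcs : cs.length = n.toNat := digitsR_len L n.toNat k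
  have hsum : sumPoly L cs = k := by
    have h1 := digitsR_sum L n.toNat k
    have h2 := digitsR_snd L n.toNat k hm1
    rw [h2] at h1
    simpa using h1
  -- pointwise agreement of the per-dimension steps
  apply PySem.List.foldl_congr_mem
  intro vcon i hi
  rw [PySem.List.mem_pyRange_one] at hi
  obtain ⟨hi0, hin⟩ := hi
  have hglt : i.toNat < cs.length := by omega
  have hc : PySem.List.pyGetD cs i 0 = cs[i.toNat] := by
    rw [PySem.List.pyGetD_of_nonneg cs 0 hi0]
    simp [List.getD_eq_getElem?_getD, List.getElem?_eq_getElem hglt]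
  have hp : PySem.List.pyGetD (powsList L n.toNat) i 0 = L ^ (n - 1 - i).toNat := by
    rw [← hpows, PySem.List.pyGetD_map_pyRange_of_nonneg _ n i 0 hi0 hin]
  simp only [hc, hp]
  -- align the two j-ranges: range(0, K//2) against range(1, K//2 + 1)
  rw [PySem.List.pyRange_one 0 (Int.tdiv K 2), PySem.List.pyRange_one 1 (Int.tdiv K 2 + 1)]
  rw [show (Int.tdiv K 2 + 1 - 1) = Int.tdiv K 2 by ring,
    show (Int.tdiv K 2 - 0) = Int.tdiv K 2 by ring]
  rw [List.foldl_map, List.foldl_map]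
  apply PySem.List.foldl_congr_mem
  intro acc t ht
  have e1 : estandarCalc cs i ((0 + (t : Int)) + 1) n L
      = k - cs[i.toNat] * L ^ (n - 1 - i).toNat
        + PySem.Int.mod (cs[i.toNat] + (1 + (t : Int))) L * L ^ (n - 1 - i).toNat := by
    rw [calcA_eq L n cs hcs i hi0 hin _, hsum]
    rw [show (0 + (t : Int) + 1) = (1 + (t : Int)) by ring]
    ring
  have e2 : estandarCalc cs i (-(0 + (t : Int)) - 1) n L
      = k - cs[i.toNat] * L ^ (n - 1 - i).toNat
        + PySem.Int.mod (cs[i.toNat] - (1 + (t : Int))) L * L ^ (n - 1 - i).toNat := by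
    rw [calcA_eq L n cs hcs i hi0 hin _, hsum]
    rw [show (cs[i.toNat]'(by omega) + (-(0 + (t : Int)) - 1))
        = (cs[i.toNat]'(by omega) - (1 + (t : Int))) by ring]
    ring
  rw [e1, e2]

-- ===== VERDICT (by name: the statement is the Claim_ definition above) =====
theorem estandar_spec : Claim_equal_estandar := by
  intro lenv L n K _ _
  unfold Spec_estandar estandar estandar_alt
  by_cases hl : lenv ≤ 0
  · rw [PySem.List.pyRange_one_eq_nil hl]
    simp [hl]
  · rw [if_neg hl]
    apply PySem.List.foldl_congr_mem
    intro lista k _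
    exact congrArg (fun v => lista ++ [v]) (vcon_eq L n K k)
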